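-- pv_equiv track=rewrite | github.com/simmarum/AdventOfCode | 2016/day-01/main.py | part_2
-- ===== SOURCE A (Python) =====
-- def part_2(inp):
--     instructions = inp[0].replace(' ', '').split(',')
--     point = [0, 0]
--     direction = [0, 1]
--     visited = set()
--     visited_twice = False
--     for instr in instructions:
--         instr_dir = instr[0]
--         instr_len = int(instr[1:])
--         if instr_dir == 'R':
--             direction = [direction[1], -direction[0]]
--         if instr_dir == 'L':
--             direction = [-direction[1], direction[0]]
--         for _ in range(instr_len):
--             point = [point[0] + (direction[0]),
--                      point[1] + (direction[1])]
--             if tuple(point) in visited: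
--                 visited_twice = True
--                 break
--             else:
--                 visited.add(tuple(point))
--         if visited_twice:
--             break
--     return abs(point[0]) + abs(point[1])
-- ===== SOURCE B (Python) =====
-- DIRS = [(0, 1), (1, 0), (0, -1), (-1, 0)]  # N, E, S, W
--
-- def part_2(inp):
--     fields = inp[0].replace(' ', '').split(',')
--     # pass 1: heading index mod 4; expand every instruction into unit deltas
--     deltas = []
--     h = 0
--     for f in fields:
--         if f[0] == 'R':
--             h = (h + 1) % 4
--         if f[0] == 'L':
--             h = (h - 1) % 4
--         deltas += [DIRS[h]] * int(f[1:])
--     # pass 2: prefix-sum the deltas into the trajectory (origin excluded)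
--     x, y = 0, 0
--     path = []
--     for dx, dy in deltas:
--         x += dx
--         y += dy
--         path.append((x, y))
--     # pass 3: first cell seen twice, else the final cell
--     seen = set()
--     for p in path:
--         if p in seen:
--             return abs(p[0]) + abs(p[1])
--         seen.add(p)
--     return abs(x) + abs(y)
-- ===== Notes on version B (the rewrite author's own statement) =====
-- stated objective: alternative
-- what changed: A's fused simulate-and-detect loop (coordinate-pair rotation, break flags) is replaced by three staged passes: a heading index mod 4 into a direction table expands every instruction into a flat list of unit deltas, a prefix-sum pass turns the deltas into the trajectory, and a seen-set scan returns the first duplicate's distance (falling back to the final cell).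
import Mathlib
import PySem

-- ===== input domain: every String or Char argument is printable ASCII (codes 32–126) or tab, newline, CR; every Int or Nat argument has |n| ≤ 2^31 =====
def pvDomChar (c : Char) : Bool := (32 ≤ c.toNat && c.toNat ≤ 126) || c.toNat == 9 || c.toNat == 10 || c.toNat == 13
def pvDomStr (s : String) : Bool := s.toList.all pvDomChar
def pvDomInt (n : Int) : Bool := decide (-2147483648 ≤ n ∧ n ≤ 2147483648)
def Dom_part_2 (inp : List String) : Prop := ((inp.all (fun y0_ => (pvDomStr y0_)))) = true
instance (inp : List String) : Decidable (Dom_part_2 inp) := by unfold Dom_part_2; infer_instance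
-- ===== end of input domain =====

-- B replaces A's fused simulate-and-detect loop by three staged passes (heading-table delta expansion, prefix sums, duplicate scan); equal return value on Pre_.

-- ===== PORT A =====
-- inner loop body of A ('for _ in range(instr_len): …' with its break flag)
def pvStepA (d : Int × Int) (s : (Int × Int) × PySem.Set (Int × Int) × Bool) :
    (Int × Int) × PySem.Set (Int × Int) × Bool :=
  if s.2.2 then s else
    let p := (s.1.1 + d.1, s.1.2 + d.2)
    if PySem.Set.contains s.2.1 p then (p, s.2.1, true)
    else (p, PySem.Set.add s.2.1 p, false)

-- outer loop body of A (one instruction; 'if visited_twice: break' = skip once the flag is set)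
def pvBodyA (st : (Int × Int) × (Int × Int) × PySem.Set (Int × Int) × Bool) (instr : String) :
    (Int × Int) × (Int × Int) × PySem.Set (Int × Int) × Bool :=
  if st.2.2.2 then st else
    let c := instr.toList.headD ' '                    -- instr[0]; Pre_ guarantees instr ≠ ''
    let d := if c = 'R' then (st.2.1.2, -st.2.1.1) else st.2.1
    let d := if c = 'L' then (-d.2, d.1) else d
    let inner := (PySem.List.pyRange 0 ((PySem.Int.ofChars? instr.toList.tail).getD 0) 1).foldl
      (fun s _ => pvStepA d s) (st.1, st.2.2.1, false)  -- int(instr[1:]); Pre_ guarantees it parses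
    (inner.1, d, inner.2.1, inner.2.2)

def part_2 (inp : List String) : Int :=
  let instructions := ((PySem.Str.split? (PySem.Str.replace (PySem.List.pyGetD inp 0 "") " " "") ",").getD [])
  let st := instructions.foldl pvBodyA ((0, 0), (0, 1), PySem.Set.empty, false)
  |st.1.1| + |st.1.2|

-- ===== PORT B =====
-- the module constant DIRS (N, E, S, W)
def pvDirs : List (Int × Int) := [(0, 1), (1, 0), (0, -1), (-1, 0)]

-- pass-1 loop body: bump the heading index mod 4, append instr_len copies of DIRS[h]
-- (DIRS[h]: h is provably in 0..3, so the pyGetD default (0,0) is never taken)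
def pvDeltaStep (st : Int × List (Int × Int)) (f : String) : Int × List (Int × Int) :=
  let c := f.toList.headD ' '
  let h := if c = 'R' then PySem.Int.mod (st.1 + 1) 4 else st.1
  let h := if c = 'L' then PySem.Int.mod (h - 1) 4 else h
  (h, st.2 ++ PySem.List.pyRepeat [PySem.List.pyGetD pvDirs h (0, 0)]
        ((PySem.Int.ofChars? f.toList.tail).getD 0))

-- pass-2 loop body: prefix-sum a delta into the trajectory
def pvPrefixStep (st : (Int × Int) × List (Int × Int)) (d : Int × Int) :
    (Int × Int) × List (Int × Int) :=
  let q := (st.1.1 + d.1, st.1.2 + d.2)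
  (q, st.2 ++ [q])

-- pass 3: first cell already seen, else the fallback distance
def scanDup (seen : PySem.Set (Int × Int)) (fallback : Int) : List (Int × Int) → Int
  | [] => fallback
  | p :: rest =>
      if PySem.Set.contains seen p then |p.1| + |p.2|
      else scanDup (PySem.Set.add seen p) fallback rest

def part_2_alt (inp : List String) : Int :=
  let fields := ((PySem.Str.split? (PySem.Str.replace (PySem.List.pyGetD inp 0 "") " " "") ",").getD [])
  let deltas := (fields.foldl pvDeltaStep (0, [])).2
  let st := deltas.foldl pvPrefixStep ((0, 0), [])
  scanDup PySem.Set.empty (|st.1.1| + |st.1.2|) st.2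

-- ===== PRECONDITION & SPEC =====
-- exactly where the Python A returns: a first line exists, and every comma field is nonempty with an int-parsable tail
def Pre_part_2 (inp : List String) : Prop :=
  inp ≠ [] ∧
  ∀ s ∈ ((PySem.Str.split? (PySem.Str.replace (PySem.List.pyGetD inp 0 "") " " "") ",").getD []),
    s.toList ≠ [] ∧ (PySem.Int.ofChars? s.toList.tail).isSome = true
instance (inp : List String) : Decidable (Pre_part_2 inp) := by unfold Pre_part_2; infer_instance

def pvWitness_part_2 : List String := (["R2, L3"])

def Spec_part_2 (inp : List String) (out : Int) : Prop := out = part_2_alt inp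
instance (inp : List String) (out : Int) : Decidable (Spec_part_2 inp out) := by unfold Spec_part_2; infer_instance

-- ===== CLAIM (what is proved, stated in full; the proofs are below) =====
def Claim_equal_part_2 : Prop := ∀ (inp : List String), Dom_part_2 inp → Pre_part_2 inp → Spec_part_2 inp (part_2 inp)

-- ===== LEMMAS AND PROOFS =====

-- the rotation A's two ifs perform, named for the proofs
def pvRotA (c : Char) (d : Int × Int) : Int × Int :=
  let d := if c = 'R' then (d.2, -d.1) else d
  if c = 'L' then (-d.2, d.1) else d

-- the heading update B's two ifs perform, named for the proofs
def pvTurn (c : Char) (h : Int) : Int :=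
  let h := if c = 'R' then PySem.Int.mod (h + 1) 4 else h
  if c = 'L' then PySem.Int.mod (h - 1) 4 else h

def pvDirGet (h : Int) : Int × Int := PySem.List.pyGetD pvDirs h (0, 0)

-- the cells of k unit steps of d from p (the trajectory a segment contributes)
def pvPos (p d : Int × Int) : Nat → List (Int × Int)
  | 0 => []
  | k + 1 => (p.1 + d.1, p.2 + d.2) :: pvPos (p.1 + d.1, p.2 + d.2) d (k)

-- A's walk through a cell list: stop at the first already-seen cell, else end at the last
def pvWalkA (vis : PySem.Set (Int × Int)) (p : Int × Int) : List (Int × Int) → Int × Int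
  | [] => p
  | q :: rest => if PySem.Set.contains vis q then q else pvWalkA (PySem.Set.add vis q) q rest

-- recursive form of B's pass-1 output
def pvDs : List String → Int → List (Int × Int)
  | [], _ => []
  | f :: rest, h =>
      let h' := pvTurn (f.toList.headD ' ') h
      List.replicate ((PySem.Int.ofChars? f.toList.tail).getD 0).toNat (pvDirGet h') ++ pvDs rest h'

-- recursive form of B's pass-2 output
def pvPath : (Int × Int) → List (Int × Int) → List (Int × Int)
  | _, [] => []
  | p, d :: ds => (p.1 + d.1, p.2 + d.2) :: pvPath (p.1 + d.1, p.2 + d.2) ds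

theorem pv_last_cons {α : Type} (q p : α) (l : List α) :
    l.getLastD q = ((q :: l).getLastD p) := by
  simp [List.getLastD_eq_getLast?, List.getLast?_cons]

theorem pv_foldl_const {α σ : Type} (f : σ → σ) (l : List α) (init : σ) :
    l.foldl (fun s _ => f s) init = f^[l.length] init := by
  induction l generalizing init with
  | nil => rfl
  | cons x xs ih => simp [List.foldl_cons, ih, Function.iterate_succ_apply]

theorem pvStepA_flag (d : Int × Int) (k : Nat) (s : (Int × Int) × PySem.Set (Int × Int) × Bool)
    (h : s.2.2 = true) : (pvStepA d)^[k] s = s := by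
  induction k with
  | zero => rfl
  | succ k ih =>
    rw [Function.iterate_succ_apply]
    simp only [pvStepA, h, if_true]
    exact ih

theorem pvBodyA_flag (l : List String) (s : (Int × Int) × (Int × Int) × PySem.Set (Int × Int) × Bool)
    (h : s.2.2.2 = true) : l.foldl pvBodyA s = s := by
  induction l with
  | nil => rfl
  | cons x xs ih =>
    rw [List.foldl_cons]
    simp only [pvBodyA, h, if_true]
    exact ih

theorem pvBodyA_eq (p d : Int × Int) (vis : PySem.Set (Int × Int)) (instr : String) :
    pvBodyA (p, d, vis, false) instr =
      (((pvStepA (pvRotA (instr.toList.headD ' ') d))^[((PySem.Int.ofChars? instr.toList.tail).getD 0).toNat] (p, vis, false)).1,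
       pvRotA (instr.toList.headD ' ') d,
       ((pvStepA (pvRotA (instr.toList.headD ' ') d))^[((PySem.Int.ofChars? instr.toList.tail).getD 0).toNat] (p, vis, false)).2.1,
       ((pvStepA (pvRotA (instr.toList.headD ' ') d))^[((PySem.Int.ofChars? instr.toList.tail).getD 0).toNat] (p, vis, false)).2.2) := by
  simp only [pvBodyA, pv_foldl_const, PySem.List.length_pyRange_one, Int.sub_zero,
    Bool.false_eq_true, if_false]
  rfl

theorem pvDeltaStep_eq (h : Int) (acc : List (Int × Int)) (f : String) :
    pvDeltaStep (h, acc) f =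
      (pvTurn (f.toList.headD ' ') h,
       acc ++ List.replicate ((PySem.Int.ofChars? f.toList.tail).getD 0).toNat
         (pvDirGet (pvTurn (f.toList.headD ' ') h))) := by
  simp only [pvDeltaStep, pvTurn, pvDirGet, PySem.List.pyRepeat_singleton]

-- B's pass 1 computes pvDs (the accumulator is appended on the right)
theorem pv_pass1 (l : List String) :
    ∀ (h : Int) (acc : List (Int × Int)),
    (l.foldl pvDeltaStep (h, acc)).2 = acc ++ pvDs l h := by
  induction l with
  | nil => intro h acc; simp [pvDs]
  | cons f rest ih =>
    intro h acc
    rw [List.foldl_cons, pvDeltaStep_eq, ih]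
    simp [pvDs]

-- B's pass 2 computes pvPath and ends at its last cell
theorem pv_pass2 (ds : List (Int × Int)) :
    ∀ (p : Int × Int) (acc : List (Int × Int)),
    ds.foldl pvPrefixStep (p, acc) = ((pvPath p ds).getLastD p, acc ++ pvPath p ds) := by
  induction ds with
  | nil => intro p acc; simp [pvPath]
  | cons d ds ih =>
    intro p acc
    rw [List.foldl_cons]
    have hs : pvPrefixStep (p, acc) d = ((p.1 + d.1, p.2 + d.2), acc ++ [(p.1 + d.1, p.2 + d.2)]) := rfl
    rw [hs, ih]
    simp only [pvPath, List.append_assoc, List.singleton_append, Prod.mk.injEq, and_true]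
    exact pv_last_cons _ _ _

theorem pv_path_append (ds1 : List (Int × Int)) :
    ∀ (p : Int × Int) (ds2 : List (Int × Int)),
    pvPath p (ds1 ++ ds2) = pvPath p ds1 ++ pvPath ((pvPath p ds1).getLastD p) ds2 := by
  induction ds1 with
  | nil => intro p ds2; simp [pvPath]
  | cons d ds ih =>
    intro p ds2
    simp only [List.cons_append, pvPath, List.cons.injEq, true_and]
    rw [ih, ← pv_last_cons]

theorem pv_path_replicate (k : Nat) :
    ∀ (p d : Int × Int), pvPath p (List.replicate k d) = pvPos p d k := by
  induction k with
  | zero => intro p d; rfl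
  | succ k ih => intro p d; simp only [List.replicate_succ, pvPath, pvPos, ih]

-- the heading-table update tracks A's pair rotation
theorem pv_rot_bridge (c : Char) (h : Int) (h0 : 0 ≤ h) (h4 : h < 4) :
    pvRotA c (pvDirGet h) = pvDirGet (pvTurn c h) ∧ 0 ≤ pvTurn c h ∧ pvTurn c h < 4 := by
  by_cases hR : c = 'R' <;> by_cases hL : c = 'L' <;>
    simp only [pvRotA, pvTurn, hR, hL, if_true, if_false] <;>
    first
      | (exact ⟨trivial, h0, h4⟩)
      | (interval_cases h <;> exact ⟨rfl, by decide, by decide⟩)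

theorem pv_innerA (d : Int × Int) (k : Nat) :
    ∀ (p : Int × Int) (vis : PySem.Set (Int × Int)) (tail : List (Int × Int)),
    pvWalkA vis p (pvPos p d k ++ tail) =
      (let s := (pvStepA d)^[k] (p, vis, false)
       if s.2.2 then s.1 else pvWalkA s.2.1 s.1 tail) ∧
    (((pvStepA d)^[k] (p, vis, false)).2.2 = false →
      ((pvStepA d)^[k] (p, vis, false)).1 = (pvPos p d k).getLastD p) := by
  induction k with
  | zero => intro p vis tail; exact ⟨rfl, fun _ => rfl⟩
  | succ k ih =>
    intro p vis tail
    rw [Function.iterate_succ_apply]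
    by_cases hmem : (p.1 + d.1, p.2 + d.2) ∈ vis
    · have hs : pvStepA d (p, vis, false) = ((p.1 + d.1, p.2 + d.2), vis, true) := by
        simp [pvStepA, hmem]
      rw [hs, pvStepA_flag d k _ rfl]
      refine ⟨?_, by simp⟩
      simp [pvPos, pvWalkA, hmem]
    · have hs : pvStepA d (p, vis, false) =
          ((p.1 + d.1, p.2 + d.2), PySem.Set.add vis (p.1 + d.1, p.2 + d.2), false) := by
        simp [pvStepA, hmem]
      rw [hs]
      obtain ⟨h1, h2⟩ := ih (p.1 + d.1, p.2 + d.2) (PySem.Set.add vis (p.1 + d.1, p.2 + d.2)) tail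
      constructor
      · simpa [pvPos, pvWalkA, hmem] using h1
      · intro hf
        rw [h2 hf]
        exact pv_last_cons _ _ _

-- main simulation: A's fused fold = walk through B's generated path
theorem pv_main (l : List String) :
    ∀ (h : Int), 0 ≤ h → h < 4 →
    ∀ (p : Int × Int) (vis : PySem.Set (Int × Int)) (tail : List (Int × Int)),
    pvWalkA vis p (pvPath p (pvDs l h) ++ tail) =
      (let a := l.foldl pvBodyA (p, pvDirGet h, vis, false)
       if a.2.2.2 then a.1 else pvWalkA a.2.2.1 a.1 tail) := by
  induction l with
  | nil => intro h _ _ p vis tail; rfl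
  | cons f rest ih =>
    intro h h0 h4 p vis tail
    obtain ⟨hrot, hh0, hh4⟩ := pv_rot_bridge (f.toList.headD ' ') h h0 h4
    rw [List.foldl_cons, pvBodyA_eq, hrot]
    simp only [pvDs]
    set h' := pvTurn (f.toList.headD ' ') h with hh'
    set K := ((PySem.Int.ofChars? f.toList.tail).getD 0).toNat with hK
    rw [pv_path_append, pv_path_replicate, List.append_assoc]
    set L := (pvPos p (pvDirGet h') K).getLastD p with hL
    set X := (pvStepA (pvDirGet h'))^[K] (p, vis, false) with hX
    obtain ⟨h1, h2⟩ := pv_innerA (pvDirGet h') K p vis (pvPath L (pvDs rest h') ++ tail)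
    rw [← hX] at h1 h2
    rw [← hL] at h2
    rw [h1]
    by_cases hf : X.2.2 = true
    · rw [pvBodyA_flag rest (X.1, pvDirGet h', X.2.1, X.2.2) (by simpa using hf)]
      simp only [hf, if_true]
    · simp only [Bool.not_eq_true] at hf
      simp only [h2 hf, hf, Bool.false_eq_true, if_false]
      exact ih h' hh0 hh4 L X.2.1 tail

-- pass 3 computes the distance of A's walk endpoint
theorem pv_scanDup (path : List (Int × Int)) :
    ∀ (vis : PySem.Set (Int × Int)) (p : Int × Int),
    scanDup vis (|(path.getLastD p).1| + |(path.getLastD p).2|) path =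
      |(pvWalkA vis p path).1| + |(pvWalkA vis p path).2| := by
  induction path with
  | nil => intro vis p; rfl
  | cons q rest ih =>
    intro vis p
    by_cases h : q ∈ vis
    · simp [scanDup, pvWalkA, h]
    · rw [← pv_last_cons q p rest]
      simpa [scanDup, pvWalkA, h] using ih (PySem.Set.add vis q) q

-- ===== VERDICT (by name: the statement is the Claim_ definition above) =====
theorem part_2_spec : Claim_equal_part_2 := by
  intro inp _ _
  unfold Spec_part_2
  simp only [part_2, part_2_alt]
  set l := ((PySem.Str.split? (PySem.Str.replace (PySem.List.pyGetD inp 0 "") " " "") ",").getD []) with hl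
  rw [pv_pass1 l 0 [], List.nil_append, pv_pass2]
  simp only [List.nil_append]
  rw [pv_scanDup]
  have hm := pv_main l 0 (by norm_num) (by norm_num) (0, 0) PySem.Set.empty []
  rw [List.append_nil] at hm
  have hd : pvDirGet 0 = ((0 : Int), (1 : Int)) := by decide
  rw [hd] at hm
  rw [hm]
  by_cases hf : (l.foldl pvBodyA ((0, 0), (0, 1), PySem.Set.empty, false)).2.2.2 = true
  · simp only [hf, if_true]
  · simp only [Bool.not_eq_true] at hf
    simp only [hf, Bool.false_eq_true, if_false, pvWalkA]
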